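-- pv_equiv track=rewrite | github.com/yashsirvi/Text-and-Music-Generation-using-Markov-Chains | utils.py | human_readable_join
-- ===== SOURCE A (Python) =====
-- def human_readable_join(words):
--     """
--     words is a list of words
--     """
--     output = ""
--     for word in words:
--         if word in [".", "!", "?", ",", ";", ":"]:
--             output += word
--         else:
--             output += " " + word
--     return output.strip()
-- ===== SOURCE B (Python) =====
-- def human_readable_join(words):
--     """
--     words is a list of words
--     Divide-and-conquer: decorate each word (bare punctuation keeps no leading
--     space, anything else gets one) and concatenate halves recursively.
--     """
--     punct = {".", "!", "?", ",", ";", ":"}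
--
--     def glue(lo, hi):
--         if hi <= lo:
--             return ""
--         if hi == lo + 1:
--             w = words[lo]
--             return w if w in punct else " " + w
--         mid = (lo + hi) // 2
--         return glue(lo, mid) + glue(mid, hi)
--
--     return glue(0, len(words)).strip()
-- ===== Notes on version B (the rewrite author's own statement) =====
-- stated objective: alternative
-- what changed: Replaced the left-to-right string accumulator loop by a divide-and-conquer glue: each word is decorated independently (bare punctuation keeps no leading space) and the two halves of the list are concatenated recursively, then stripped.
import Mathlib
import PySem

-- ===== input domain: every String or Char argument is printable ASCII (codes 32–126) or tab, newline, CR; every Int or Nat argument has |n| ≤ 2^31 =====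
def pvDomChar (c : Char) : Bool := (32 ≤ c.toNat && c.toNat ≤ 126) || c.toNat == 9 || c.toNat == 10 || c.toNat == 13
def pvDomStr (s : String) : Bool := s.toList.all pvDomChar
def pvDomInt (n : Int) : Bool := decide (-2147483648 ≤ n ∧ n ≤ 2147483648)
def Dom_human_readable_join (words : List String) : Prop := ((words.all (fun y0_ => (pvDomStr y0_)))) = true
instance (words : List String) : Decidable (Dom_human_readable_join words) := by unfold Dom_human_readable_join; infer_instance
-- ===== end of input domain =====

-- B replaces A's left-to-right accumulator loop with a divide-and-conquer concatenation; return values agree (alternative structure, no speed claim).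

-- ===== PORT A =====
def human_readable_join (words : List String) : String :=
  let output : String :=
    words.foldl (fun output word =>
      if word ∈ [".", "!", "?", ",", ";", ":"] then output ++ word
      else output ++ (" " ++ word)) ""
  PySem.Str.strip output

-- ===== PORT B =====
-- decorated word: bare punctuation as-is, otherwise a leading space (B's `w if w in punct else " " + w`)
def hrjDec (w : String) : String :=
  if w ∈ [".", "!", "?", ",", ";", ":"] then w else " " ++ w

-- B's recursive glue over the half-open index range [lo, hi)
def hrjGlue (words : List String) (lo hi : Nat) : String :=
  if hi ≤ lo then ""
  else if hi = lo + 1 then hrjDec (words.getD lo "")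
  else hrjGlue words lo ((lo + hi) / 2) ++ hrjGlue words ((lo + hi) / 2) hi
termination_by hi - lo
decreasing_by all_goals omega

def human_readable_join_alt (words : List String) : String :=
  PySem.Str.strip (hrjGlue words 0 words.length)

-- ===== PRECONDITION & SPEC =====
def Spec_human_readable_join (words : List String) (out : String) : Prop := out = human_readable_join_alt words
instance (words : List String) (out : String) : Decidable (Spec_human_readable_join words out) := by unfold Spec_human_readable_join; infer_instance

-- ===== CLAIM (what is proved, stated in full; the proofs are below) =====
def Claim_equal_human_readable_join : Prop := ∀ (words : List String), Dom_human_readable_join words → Spec_human_readable_join words (human_readable_join words)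

-- ===== LEMMAS AND PROOFS =====

-- canonical form both ports reduce to: concatenation of decorated words
def hrjCat (ws : List String) : String := ws.foldr (fun w r => hrjDec w ++ r) ""

theorem hrjCat_append (a b : List String) : hrjCat (a ++ b) = hrjCat a ++ hrjCat b := by
  induction a with
  | nil => simp [hrjCat]
  | cons x xs ih => simp [hrjCat, List.foldr] at ih ⊢; rw [ih, String.append_assoc]

theorem hrjFoldl_eq (ws : List String) (acc : String) :
    ws.foldl (fun output word =>
      if word ∈ [".", "!", "?", ",", ";", ":"] then output ++ word
      else output ++ (" " ++ word)) acc = acc ++ hrjCat ws := by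
  induction ws generalizing acc with
  | nil => simp [hrjCat]
  | cons x xs ih =>
    simp only [List.foldl_cons, ih, hrjCat, List.foldr, hrjDec]
    split <;> simp [String.append_assoc]

theorem hrjGlue_eq (words : List String) (n lo hi : Nat) (hn : hi - lo ≤ n)
    (hhi : hi ≤ words.length) :
    hrjGlue words lo hi = hrjCat ((words.drop lo).take (hi - lo)) := by
  induction n generalizing lo hi with
  | zero =>
    have : hi ≤ lo := by omega
    rw [hrjGlue]
    simp [this, hrjCat, Nat.sub_eq_zero_of_le this]
  | succ n ih =>
    rw [hrjGlue]
    by_cases h1 : hi ≤ lo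
    · simp [h1, hrjCat, Nat.sub_eq_zero_of_le h1]
    · by_cases h2 : hi = lo + 1
      · have hlo : lo < words.length := by omega
        have hsub : hi - lo = 1 := by omega
        rw [if_neg h1, if_pos h2, hsub, List.take_one]
        simp [List.head?_drop, List.getElem?_eq_getElem hlo, hrjCat, List.getD]
      · rw [if_neg h1, if_neg h2]
        have hm1 : lo < (lo + hi) / 2 := by omega
        have hm2 : (lo + hi) / 2 < hi := by omega
        rw [ih lo ((lo + hi) / 2) (by omega) (by omega),
            ih ((lo + hi) / 2) hi (by omega) hhi, ← hrjCat_append]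
        congr 1
        have hsum : hi - lo = ((lo + hi) / 2 - lo) + (hi - (lo + hi) / 2) := by omega
        have hd : lo + ((lo + hi) / 2 - lo) = (lo + hi) / 2 := by omega
        rw [hsum, List.take_add, List.drop_drop, hd]

-- ===== VERDICT (by name: the statement is the Claim_ definition above) =====
theorem human_readable_join_spec : Claim_equal_human_readable_join := by
  intro words _
  unfold Spec_human_readable_join human_readable_join human_readable_join_alt
  rw [hrjFoldl_eq, hrjGlue_eq words words.length 0 words.length (by omega) (le_refl _)]
  simp
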